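-- pv_equiv track=rewrite | github.com/jramdass/advent-of-code | 2020/day-06/custom_customs.py | count_shared_answers
-- ===== SOURCE A (Python) =====
-- def count_shared_answers(group):
--     count = [0] * 26
--     total_count = 0
--
--     allchars = 'abcdefghijklmnopqrstuvwxyz'
--
--     for i in range(0, len(group)):
--         for char in allchars:
--             if group[i].find(char) >= 0:
--                 count[allchars.find(char)]  += 1
--
--     for i in count:
--         if i != 0 and i == len(group):
--             total_count += 1
--
--     return total_count
-- ===== SOURCE B (Python) =====
-- def count_shared_answers(group):
--     if not group:
--         return 0
--     common = set(group[0])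
--     for m in group[1:]:
--         common &= set(m)
--     return len(common & set('abcdefghijklmnopqrstuvwxyz'))
-- ===== Notes on version B (the rewrite author's own statement) =====
-- stated objective: faster
-- what changed: Replaces A's 26-slot count array (26 substring scans per member plus a second counting pass) with a single shrinking set intersection over the members, intersected with the lowercase alphabet at the end.
import Mathlib
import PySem

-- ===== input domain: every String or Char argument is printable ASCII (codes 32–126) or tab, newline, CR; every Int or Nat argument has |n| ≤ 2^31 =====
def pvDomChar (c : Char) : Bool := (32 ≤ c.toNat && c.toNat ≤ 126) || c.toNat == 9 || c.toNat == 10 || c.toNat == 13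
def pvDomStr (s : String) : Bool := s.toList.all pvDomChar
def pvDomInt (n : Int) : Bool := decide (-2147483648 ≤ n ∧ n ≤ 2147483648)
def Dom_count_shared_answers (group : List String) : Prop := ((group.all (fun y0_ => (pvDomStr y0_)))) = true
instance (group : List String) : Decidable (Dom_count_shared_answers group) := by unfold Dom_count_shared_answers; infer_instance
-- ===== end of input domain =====

-- B replaces A's 26-slot count array and second counting pass by a shrinking set
-- intersection over the members, intersected with the alphabet at the end (measured faster).

-- ===== PORT A =====
-- A's `allchars` constant
def pvAlphaStr : String := "abcdefghijklmnopqrstuvwxyz"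

-- body of A's inner `for char in allchars` loop (named so the proofs can speak about it)
def pvStepA (member : String) (cnt : List Int) (char : Char) : List Int :=
  if PySem.Str.find member (String.ofList [char]) ≥ 0 then
    PySem.List.pySetD cnt (PySem.Str.find pvAlphaStr (String.ofList [char]))
      (PySem.List.pyGetD cnt (PySem.Str.find pvAlphaStr (String.ofList [char])) 0 + 1)
  else cnt

def pvInnerA (member : String) (cnt : List Int) : List Int :=
  pvAlphaStr.toList.foldl (pvStepA member) cnt

def count_shared_answers (group : List String) : Int :=
  let count : List Int := List.replicate 26 0
  let count :=
    (PySem.List.pyRange 0 (group.length : Int) 1).foldl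
      (fun cnt i => pvInnerA (PySem.List.pyGetD group i "") cnt) count
  count.foldl (fun total i => if i ≠ 0 ∧ i = (group.length : Int) then total + 1 else total) 0

-- ===== PORT B =====
def count_shared_answers_alt (group : List String) : Int :=
  match group with
  | [] => 0
  | g :: rest =>
    let common :=
      rest.foldl (fun c m => PySem.Set.inter c (PySem.Set.ofList m.toList))
        (PySem.Set.ofList g.toList)
    PySem.Set.len (PySem.Set.inter common (PySem.Set.ofList "abcdefghijklmnopqrstuvwxyz".toList))

-- ===== PRECONDITION & SPEC =====
def Spec_count_shared_answers (group : List String) (out : Int) : Prop := out = count_shared_answers_alt group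
instance (group : List String) (out : Int) : Decidable (Spec_count_shared_answers group out) := by unfold Spec_count_shared_answers; infer_instance

-- ===== CLAIM (what is proved, stated in full; the proofs are below) =====
def Claim_equal_count_shared_answers : Prop := ∀ (group : List String), Dom_count_shared_answers group → Spec_count_shared_answers group (count_shared_answers group)

-- ===== LEMMAS AND PROOFS =====

-- the alphabet as a list of chars, and A's per-letter slot index
def pvAlpha : List Char := pvAlphaStr.toList
def pvIdx (c : Char) : Int := PySem.Str.find pvAlphaStr (String.ofList [c])

theorem pv_find_go_ge (sub s : List Char) (k : Nat) : -1 ≤ PySem.Chars.find.go sub s k := by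
  induction s generalizing k with
  | nil => simp only [PySem.Chars.find.go]; split <;> omega
  | cons a t ih =>
    simp only [PySem.Chars.find.go]
    split
    · omega
    · exact ih (k + 1)

theorem pv_find_ge (s sub : String) : -1 ≤ PySem.Str.find s sub := by
  simp only [PySem.Str.find, PySem.Chars.find]
  exact pv_find_go_ge _ _ 0

theorem pv_find_single_nonneg_iff (m : String) (c : Char) :
    PySem.Str.find m (String.ofList [c]) ≥ 0 ↔ c ∈ m.toList := by
  constructor
  · intro h
    have h2 := (PySem.Str.find_eq_neg_one_iff m (String.ofList [c]))
    have hne : ¬ PySem.Str.find m (String.ofList [c]) = -1 := by omega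
    have hinf := not_not.mp (fun hn => hne (h2.mpr hn))
    rw [String.toList_ofList] at hinf
    exact (List.singleton_infix_iff c m.toList).mp hinf
  · intro h
    have hinf : (String.ofList [c]).toList <:+: m.toList := by
      rw [String.toList_ofList]; exact (List.singleton_infix_iff c m.toList).mpr h
    have := pv_find_ge m (String.ofList [c])
    have hne : PySem.Str.find m (String.ofList [c]) ≠ -1 := by
      intro he; exact ((PySem.Str.find_eq_neg_one_iff _ _).mp he) hinf
    omega

-- facts about the 26 slot indices
set_option maxRecDepth 10000 in
theorem pv_len : pvAlpha.length = 26 := by decide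

set_option maxRecDepth 10000 in
theorem pv_map : pvAlpha.map pvIdx = List.map Int.ofNat (List.range 26) := by decide

theorem pv_idx_getElem (k : Nat) (hk : k < 26) :
    pvIdx (pvAlpha[k]'(by rw [pv_len]; exact hk)) = (k : Int) := by
  have hkl : k < pvAlpha.length := by rw [pv_len]; exact hk
  have h1 : (pvAlpha.map pvIdx)[k]? = some (pvIdx (pvAlpha[k]'hkl)) := by
    simp [hkl]
  have h2 : (pvAlpha.map pvIdx)[k]? = some (Int.ofNat k) := by
    rw [pv_map]
    simp [hk]
  rw [h1] at h2
  simpa using Option.some.inj h2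

theorem pv_idx_range : ∀ c ∈ pvAlpha, 0 ≤ pvIdx c ∧ pvIdx c < 26 := by
  intro c hc
  obtain ⟨k, hk, rfl⟩ := List.mem_iff_getElem.mp hc
  have hk26 : k < 26 := by rw [pv_len] at hk; exact hk
  rw [pv_idx_getElem k hk26]
  omega

theorem pv_idx_nodup : (pvAlpha.map pvIdx).Nodup := by
  rw [pv_map]
  exact (List.nodup_range).map (fun a b h => Int.ofNat.inj h)

theorem pv_alpha_nodup : pvAlpha.Nodup := by
  have := pv_idx_nodup
  exact this.of_map pvIdx

theorem pv_idx_getD (j : Nat) (hj : j < 26) :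
    pvAlpha.getD j ' ' ∈ pvAlpha ∧ pvIdx (pvAlpha.getD j ' ') = (j : Int) := by
  have hjl : j < pvAlpha.length := by rw [pv_len]; exact hj
  rw [List.getD_eq_getElem pvAlpha ' ' hjl]
  exact ⟨List.getElem_mem hjl, pv_idx_getElem j hj⟩

theorem pv_idx_inj (c : Char) (hc : c ∈ pvAlpha) (j : Nat) (hj : j < 26)
    (h : pvIdx c = (j : Int)) : c = pvAlpha.getD j ' ' := by
  obtain ⟨k, hk, rfl⟩ := List.mem_iff_getElem.mp hc
  have hk26 : k < 26 := by rw [pv_len] at hk; exact hk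
  rw [pv_idx_getElem k hk26] at h
  have : k = j := by exact_mod_cast h
  subst this
  rw [List.getD_eq_getElem pvAlpha ' ' hk]

-- one step of the inner loop, in range: pointwise effect on the count array
theorem pv_stepA_spec (m : String) (cnt : List Int) (c : Char) (k : Nat)
    (hk : k < cnt.length) (hik : pvIdx c = (k : Int)) :
    (pvStepA m cnt c).length = cnt.length ∧
    ∀ j : Nat, (pvStepA m cnt c).getD j 0 =
      cnt.getD j 0 + (if pvIdx c = (j : Int) ∧ PySem.Str.find m (String.ofList [c]) ≥ 0 then 1 else 0) := by
  have hset : pvStepA m cnt c =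
      if PySem.Str.find m (String.ofList [c]) ≥ 0 then cnt.set k (cnt.getD k 0 + 1) else cnt := by
    unfold pvIdx at hik
    unfold pvStepA
    rw [hik]
    simp only [PySem.List.pySetD, PySem.List.pyGetD_natCast]
    rw [PySem.List.pySet?_natCast cnt k (cnt.getD k 0 + 1) hk]
    rfl
  rw [hset]
  by_cases hcond : PySem.Str.find m (String.ofList [c]) ≥ 0
  · simp only [if_pos hcond]
    refine ⟨List.length_set .., fun j => ?_⟩
    by_cases hjk : k = j
    · subst hjk
      rw [if_pos ⟨hik, hcond⟩]
      simp [List.getD, hk]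
    · have : pvIdx c ≠ (j : Int) := by rw [hik]; exact_mod_cast hjk
      rw [if_neg (fun hand => this hand.1)]
      simp [List.getD, List.getElem?_set_ne hjk]
  · simp only [if_neg hcond]
    refine ⟨by trivial, fun j => ?_⟩
    rw [if_neg (fun hand => hcond hand.2)]
    omega

-- the whole inner loop over a sublist of the alphabet
theorem pv_inner_fold (m : String) (chars : List Char) :
    ∀ (cnt : List Int),
    (∀ c ∈ chars, ∃ k : Nat, k < cnt.length ∧ pvIdx c = (k : Int)) →
    (chars.map pvIdx).Nodup →
    (chars.foldl (pvStepA m) cnt).length = cnt.length ∧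
    ∀ j : Nat, (chars.foldl (pvStepA m) cnt).getD j 0 =
      cnt.getD j 0 +
        (if ∃ c ∈ chars, pvIdx c = (j : Int) ∧ PySem.Str.find m (String.ofList [c]) ≥ 0 then 1 else 0) := by
  induction chars with
  | nil =>
    intro cnt _ _
    refine ⟨by trivial, fun j => ?_⟩
    simp
  | cons c cs ih =>
    intro cnt hr hn
    obtain ⟨k, hk, hik⟩ := hr c List.mem_cons_self
    obtain ⟨hslen, hsptw⟩ := pv_stepA_spec m cnt c k hk hik
    have hr' : ∀ c' ∈ cs, ∃ k : Nat, k < (pvStepA m cnt c).length ∧ pvIdx c' = (k : Int) := by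
      intro c' hc'
      obtain ⟨k', hk', hik'⟩ := hr c' (List.mem_cons_of_mem c hc')
      exact ⟨k', by rw [hslen]; exact hk', hik'⟩
    have hn' : (cs.map pvIdx).Nodup := (List.nodup_cons.mp hn).2
    obtain ⟨ihlen, ihptw⟩ := ih (pvStepA m cnt c) hr' hn'
    have hhead : pvIdx c ∉ cs.map pvIdx := (List.nodup_cons.mp hn).1
    refine ⟨by rw [List.foldl_cons, ihlen, hslen], fun j => ?_⟩
    rw [List.foldl_cons, ihptw j, hsptw j]
    by_cases hcd : pvIdx c = (j : Int) ∧ PySem.Str.find m (String.ofList [c]) ≥ 0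
    · rw [if_pos hcd]
      have hnone : ¬ ∃ c' ∈ cs, pvIdx c' = (j : Int) ∧ PySem.Str.find m (String.ofList [c']) ≥ 0 := by
        rintro ⟨c', hc', hic', -⟩
        exact hhead (by rw [← hcd.1] at hic'; exact hic' ▸ List.mem_map_of_mem hc')
      rw [if_neg hnone, if_pos ⟨c, List.mem_cons_self, hcd⟩]
      omega
    · rw [if_neg hcd]
      by_cases hex : ∃ c' ∈ cs, pvIdx c' = (j : Int) ∧ PySem.Str.find m (String.ofList [c']) ≥ 0
      · obtain ⟨c', hc', hprop⟩ := hex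
        rw [if_pos ⟨c', hc', hprop⟩, if_pos ⟨c', List.mem_cons_of_mem c hc', hprop⟩]
        omega
      · rw [if_neg hex, if_neg (by rintro ⟨c', hc', hprop⟩
                                   rcases List.mem_cons.mp hc' with rfl | hmem
                                   · exact hcd hprop
                                   · exact hex ⟨c', hmem, hprop⟩)]
        omega

-- the inner loop over the full alphabet, on a 26-slot array
set_option maxRecDepth 100000 in
theorem pv_innerA_spec (m : String) (cnt : List Int) (hl : cnt.length = 26) :
    (pvInnerA m cnt).length = 26 ∧
    ∀ j : Nat, j < 26 → (pvInnerA m cnt).getD j 0 =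
      cnt.getD j 0 + (if pvAlpha.getD j ' ' ∈ m.toList then 1 else 0) := by
  have hr : ∀ c ∈ pvAlpha, ∃ k : Nat, k < cnt.length ∧ pvIdx c = (k : Int) := by
    intro c hc
    obtain ⟨h0, h26⟩ := pv_idx_range c hc
    exact ⟨(pvIdx c).toNat, by omega, by omega⟩
  obtain ⟨hlen, hptw⟩ := pv_inner_fold m pvAlpha cnt hr pv_idx_nodup
  have e : pvInnerA m cnt = pvAlpha.foldl (pvStepA m) cnt := by unfold pvInnerA pvAlpha; rfl
  refine ⟨by rw [e, hlen, hl], fun j hj => ?_⟩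
  rw [e, hptw j]
  have hiff : (∃ c ∈ pvAlpha, pvIdx c = (j : Int) ∧ PySem.Str.find m (String.ofList [c]) ≥ 0) ↔
      pvAlpha.getD j ' ' ∈ m.toList := by
    constructor
    · rintro ⟨c, hc, hic, hfind⟩
      rw [← pv_idx_inj c hc j hj hic]
      exact (pv_find_single_nonneg_iff m c).mp hfind
    · intro hmem
      obtain ⟨hmemA, hidx⟩ := pv_idx_getD j hj
      exact ⟨pvAlpha.getD j ' ', hmemA, hidx, (pv_find_single_nonneg_iff m _).mpr hmem⟩
  rw [if_congr hiff rfl rfl]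

-- the outer loop over the members
theorem pv_outer_fold (group : List String) :
    ∀ (cnt : List Int), cnt.length = 26 →
    (group.foldl (fun cnt m => pvInnerA m cnt) cnt).length = 26 ∧
    ∀ j : Nat, j < 26 → (group.foldl (fun cnt m => pvInnerA m cnt) cnt).getD j 0 =
      cnt.getD j 0 + (group.countP (fun m => decide (pvAlpha.getD j ' ' ∈ m.toList)) : Int) := by
  induction group with
  | nil => intro cnt hl; simp [hl]
  | cons g gs ih =>
    intro cnt hl
    obtain ⟨hlen, hptw⟩ := pv_innerA_spec g cnt hl
    obtain ⟨ihlen, ihptw⟩ := ih (pvInnerA g cnt) hlen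
    refine ⟨by rw [List.foldl_cons]; exact ihlen, fun j hj => ?_⟩
    rw [List.foldl_cons, ihptw j hj, hptw j hj, List.countP_cons]
    simp only [decide_eq_true_eq]
    by_cases hx : pvAlpha.getD j ' ' ∈ g.toList
    · rw [if_pos hx, if_pos hx]
      push_cast
      omega
    · rw [if_neg hx, if_neg hx]
      push_cast
      omega

-- A computes: the number of alphabet slots shared by all members of a nonempty group
theorem pv_A_eq (group : List String) :
    count_shared_answers group =
      ((List.range 26).countP
        (fun j => decide (group ≠ [] ∧ ∀ m ∈ group, pvAlpha.getD j ' ' ∈ m.toList)) : Int) := by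
  show (List.foldl (fun total i => if i ≠ 0 ∧ i = ((group.length : Nat) : Int) then total + 1 else total) 0
      ((PySem.List.pyRange 0 (group.length : Int) 1).foldl
        (fun cnt i => pvInnerA (PySem.List.pyGetD group i "") cnt) (List.replicate 26 0))) = _
  rw [PySem.List.foldl_pyRange_zero_pyGetD' group "" (fun cnt m => pvInnerA m cnt) (List.replicate 26 0)]
  obtain ⟨hlen, hptw⟩ := pv_outer_fold group (List.replicate 26 0) (by simp)
  have hmapeq : group.foldl (fun cnt m => pvInnerA m cnt) (List.replicate 26 0) =
      (List.range 26).map (fun j => (group.countP (fun m => decide (pvAlpha.getD j ' ' ∈ m.toList)) : Int)) := by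
    apply List.ext_getElem (by rw [hlen]; simp)
    intro j hj1 hj2
    have hj : j < 26 := by rw [hlen] at hj1; exact hj1
    have h1 : (group.foldl (fun cnt m => pvInnerA m cnt) (List.replicate 26 0))[j] =
        (group.foldl (fun cnt m => pvInnerA m cnt) (List.replicate 26 0)).getD j 0 :=
      (List.getD_eq_getElem _ 0 hj1).symm
    rw [h1, hptw j hj]
    have h2 : (List.replicate 26 (0 : Int)).getD j 0 = 0 := by
      rw [List.getD_eq_getElem _ _ (by simpa using hj)]
      exact List.getElem_replicate _
    rw [h2, zero_add]
    simp only [List.getElem_map, List.getElem_range]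
  rw [hmapeq, PySem.List.foldl_ite_add_one
    (fun i => i ≠ 0 ∧ i = ((group.length : Nat) : Int)), zero_add, List.countP_map]
  congr 1
  apply List.countP_congr
  intro j hj
  have hle := List.countP_le_length (p := fun m => decide (pvAlpha.getD j ' ' ∈ m.toList)) (l := group)
  simp only [Function.comp_apply, decide_eq_true_eq]
  constructor
  · rintro ⟨hne, heq⟩
    have heq' : group.countP (fun m => decide (pvAlpha.getD j ' ' ∈ m.toList)) = group.length := by
      exact_mod_cast heq
    have hall := List.countP_eq_length.mp heq'
    refine ⟨?_, fun m hm => by simpa using hall m hm⟩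
    intro hnil
    subst hnil
    exact hne (by simp)
  · rintro ⟨hne, hall⟩
    have heq' : group.countP (fun m => decide (pvAlpha.getD j ' ' ∈ m.toList)) = group.length :=
      List.countP_eq_length.mpr (fun m hm => by simpa using hall m hm)
    have hlen0 : group.length ≠ 0 := fun h => hne (List.length_eq_zero_iff.mp h)
    constructor
    · rw [heq']
      exact_mod_cast hlen0
    · exact_mod_cast heq'

-- membership in B's running intersection
theorem pv_common_mem (rest : List String) :
    ∀ (acc : PySem.Set Char) (x : Char),
      x ∈ rest.foldl (fun c m => PySem.Set.inter c (PySem.Set.ofList m.toList)) acc ↔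
        x ∈ acc ∧ ∀ m ∈ rest, x ∈ m.toList := by
  induction rest with
  | nil => intro acc x; simp
  | cons r rs ih =>
    intro acc x
    rw [List.foldl_cons, ih, PySem.Set.mem_inter, PySem.Set.mem_ofList, List.forall_mem_cons]
    tauto

theorem pv_common_nodup (rest : List String) :
    ∀ (acc : PySem.Set Char), acc.Nodup →
      (rest.foldl (fun c m => PySem.Set.inter c (PySem.Set.ofList m.toList)) acc).Nodup := by
  induction rest with
  | nil => intro acc h; exact h
  | cons r rs ih =>
    intro acc h
    exact ih _ (PySem.Set.nodup_inter _ _ h)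

-- B computes the same number
theorem pv_B_eq (group : List String) :
    count_shared_answers_alt group =
      ((List.range 26).countP
        (fun j => decide (group ≠ [] ∧ ∀ m ∈ group, pvAlpha.getD j ' ' ∈ m.toList)) : Int) := by
  match group with
  | [] =>
    rw [show count_shared_answers_alt [] = 0 from rfl]
    rw [List.countP_eq_zero.mpr (fun j _ => by simp)]
    rfl
  | g :: rest =>
    have halph : "abcdefghijklmnopqrstuvwxyz".toList = pvAlpha := rfl
    rw [show count_shared_answers_alt (g :: rest) =
      PySem.Set.len (PySem.Set.inter
        (rest.foldl (fun c m => PySem.Set.inter c (PySem.Set.ofList m.toList))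
          (PySem.Set.ofList g.toList))
        (PySem.Set.ofList "abcdefghijklmnopqrstuvwxyz".toList)) from rfl, halph]
    set common := rest.foldl (fun c m => PySem.Set.inter c (PySem.Set.ofList m.toList))
      (PySem.Set.ofList g.toList) with hcommon
    have hcnodup : common.Nodup :=
      pv_common_nodup rest _ (PySem.Set.nodup_ofList g.toList)
    have hcmem : ∀ x, x ∈ common ↔ x ∈ g.toList ∧ ∀ m ∈ rest, x ∈ m.toList := by
      intro x
      rw [hcommon, pv_common_mem rest (PySem.Set.ofList g.toList) x, PySem.Set.mem_ofList]
    set P : Char → Bool := fun c => decide (∀ m ∈ (g :: rest), c ∈ m.toList) with hP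
    have hperm : (PySem.Set.inter common (PySem.Set.ofList pvAlpha)).Perm (pvAlpha.filter P) := by
      apply (List.perm_ext_iff_of_nodup
        (PySem.Set.nodup_inter _ _ hcnodup) (pv_alpha_nodup.filter P)).mpr
      intro x
      rw [PySem.Set.mem_inter, PySem.Set.mem_ofList, List.mem_filter, hcmem x, hP]
      simp only [List.forall_mem_cons, decide_eq_true_eq]
      tauto
    have hlen : PySem.Set.len (PySem.Set.inter common (PySem.Set.ofList pvAlpha)) =
        ((pvAlpha.filter P).length : Int) := by
      unfold PySem.Set.len
      rw [hperm.length_eq]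
    rw [hlen, ← List.countP_eq_length_filter]
    have halpha_map : pvAlpha = (List.range 26).map (fun j => pvAlpha.getD j ' ') := by
      apply List.ext_getElem (by simp [pv_len])
      intro j hj1 hj2
      rw [List.getElem_map, List.getElem_range, List.getD_eq_getElem pvAlpha ' ' hj1]
    rw [show pvAlpha.countP P = ((List.range 26).map (fun j => pvAlpha.getD j ' ')).countP P from by rw [← halpha_map],
      List.countP_map]
    congr 1
    apply List.countP_congr
    intro j hj
    simp only [Function.comp_apply, hP, decide_eq_true_eq]
    constructor
    · intro h
      exact ⟨List.cons_ne_nil g rest, h⟩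
    · rintro ⟨-, h⟩
      exact h

-- ===== VERDICT (by name: the statement is the Claim_ definition above) =====
theorem count_shared_answers_spec : Claim_equal_count_shared_answers := by
  intro group _
  unfold Spec_count_shared_answers
  rw [pv_A_eq, pv_B_eq]
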